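-- pv_equiv track=rewrite | github.com/pomaho/Project_1.0 | backend/app/config.py | parse_path_list
-- ===== SOURCE A (Python) =====
-- def parse_path_list(value: str | None) -> list[str]:
--     if not value:
--         return []
--     raw = value.strip()
--     if not raw:
--         return []
--     parts = [part.strip() for part in raw.replace(",", ";").split(";")]
--     return [part for part in parts if part]
-- ===== SOURCE B (Python) =====
-- def parse_path_list(value):
--     if value is None:
--         return []
--     result = []
--     buf = []
--     for ch in value:
--         if ch in ",;":
--             tok = "".join(buf).strip()
--             if tok:
--                 result.append(tok)
--             buf = []
--         else:
--             buf.append(ch)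
--     tok = "".join(buf).strip()
--     if tok:
--         result.append(tok)
--     return result
-- ===== Notes on version B (the rewrite author's own statement) =====
-- stated objective: alternative
-- what changed: Replaced A's replace-then-split pipeline (strip whole string, map ',' to ';', split, strip each part, filter empties) by a single-pass character tokenizer that keeps only a buffer and the result list, flushing a stripped token at each delimiter and at the end.
import Mathlib
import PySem

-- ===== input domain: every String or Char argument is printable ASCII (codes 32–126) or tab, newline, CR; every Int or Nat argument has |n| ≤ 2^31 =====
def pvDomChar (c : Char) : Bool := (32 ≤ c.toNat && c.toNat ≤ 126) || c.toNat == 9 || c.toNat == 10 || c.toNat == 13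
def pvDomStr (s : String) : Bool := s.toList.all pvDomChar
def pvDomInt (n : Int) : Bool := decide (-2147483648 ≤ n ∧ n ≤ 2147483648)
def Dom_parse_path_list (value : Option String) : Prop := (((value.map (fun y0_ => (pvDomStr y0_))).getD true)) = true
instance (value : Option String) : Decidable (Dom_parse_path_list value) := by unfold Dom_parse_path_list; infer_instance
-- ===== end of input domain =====

-- B replaces A's replace-then-split pipeline by a single-pass character tokenizer (same cost, different decomposition).

-- ===== PORT A =====
-- A: guard on falsy value, strip, guard on empty strip, replace ',' by ';', split on ';', strip parts, drop empties.
def parse_path_list (value : Option String) : List String :=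
  match value with
  | none => []
  | some v =>
    if v = "" then []
    else
      let raw := PySem.Str.strip v
      if raw = "" then []
      else
        let parts := (PySem.Chars.splitOn (PySem.Str.replace raw "," ";").toList [';']).map PySem.Chars.strip
        (parts.filter (fun p => p ≠ [])).map String.ofList

-- ===== PORT B =====
-- B: one pass over the characters with a buffer; flush a stripped, non-empty token at each delimiter and at the end.
def parse_path_list_alt (value : Option String) : List String :=
  match value with
  | none => []
  | some v =>
    let step : (List String × List Char) → Char → (List String × List Char) :=
      fun st ch =>
        if ch = ',' || ch = ';' then
          let tok := PySem.Chars.strip st.2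
          (if tok ≠ [] then st.1 ++ [String.ofList tok] else st.1, [])
        else (st.1, st.2 ++ [ch])
    let fin := v.toList.foldl step ([], [])
    let tok := PySem.Chars.strip fin.2
    if tok ≠ [] then fin.1 ++ [String.ofList tok] else fin.1

-- ===== PRECONDITION & SPEC =====
def Spec_parse_path_list (value : Option String) (out : List String) : Prop := out = parse_path_list_alt value
instance (value : Option String) (out : List String) : Decidable (Spec_parse_path_list value out) := by unfold Spec_parse_path_list; infer_instance

-- ===== CLAIM (what is proved, stated in full; the proofs are below) =====
def Claim_equal_parse_path_list : Prop := ∀ (value : Option String), Dom_parse_path_list value → Spec_parse_path_list value (parse_path_list value)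

-- ===== LEMMAS AND PROOFS =====

/-- B's loop body, named for the proofs (definitionally the lambda in the port). -/
def pvStep (st : List String × List Char) (ch : Char) : List String × List Char :=
  if ch = ',' || ch = ';' then
    (if PySem.Chars.strip st.2 ≠ [] then st.1 ++ [String.ofList (PySem.Chars.strip st.2)] else st.1, [])
  else (st.1, st.2 ++ [ch])

/-- B's final flush, named for the proofs. -/
def pvFlush (st : List String × List Char) : List String :=
  if PySem.Chars.strip st.2 ≠ [] then st.1 ++ [String.ofList (PySem.Chars.strip st.2)] else st.1

/-- replace ',' by ';' on a single char. -/
def pvF (c : Char) : Char := if c = ',' then ';' else c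

/-- split at ';' only. -/
def pvSplit1 : List Char → List (List Char)
  | [] => [[]]
  | c :: t => if c = ';' then [] :: pvSplit1 t else (pvSplit1 t).modifyHead (c :: ·)

/-- split at ',' or ';'. -/
def pvSplit2 : List Char → List (List Char)
  | [] => [[]]
  | c :: t => if c = ',' ∨ c = ';' then [] :: pvSplit2 t else (pvSplit2 t).modifyHead (c :: ·)

/-- append ws to the last piece. -/
def pvAppLast (ws : List Char) : List (List Char) → List (List Char)
  | [] => []
  | [p] => [p ++ ws]
  | p :: q :: r => p :: pvAppLast ws (q :: r)

/-- strip each piece, drop empties, make strings. -/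
def pvT (ps : List (List Char)) : List String :=
  ((ps.map PySem.Chars.strip).filter (fun p => p ≠ [])).map String.ofList

theorem pvT_cons (p : List Char) (ps : List (List Char)) :
    pvT (p :: ps) = (if PySem.Chars.strip p ≠ [] then [String.ofList (PySem.Chars.strip p)] else []) ++ pvT ps := by
  simp only [pvT, List.map_cons, List.filter_cons]
  split_ifs with h1 h2 h2 <;> simp_all

theorem pvSplit2_ne_nil (cs : List Char) : pvSplit2 cs ≠ [] := by
  cases cs with
  | nil => simp [pvSplit2]
  | cons c t =>
    simp only [pvSplit2]
    split
    · simp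
    · cases h : pvSplit2 t with
      | nil => exact absurd h (pvSplit2_ne_nil t)
      | cons p ps => simp

theorem pvSplit1_ne_nil (cs : List Char) : pvSplit1 cs ≠ [] := by
  cases cs with
  | nil => simp [pvSplit1]
  | cons c t =>
    simp only [pvSplit1]
    split
    · simp
    · cases h : pvSplit1 t with
      | nil => exact absurd h (pvSplit1_ne_nil t)
      | cons p ps => simp

theorem pv_rep_go (fuel : Nat) : ∀ (cs acc : List Char), cs.length ≤ fuel →
    PySem.Chars.replace.go [','] [';'] fuel cs acc = acc.reverse ++ cs.map pvF := by
  induction fuel with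
  | zero =>
    intro cs acc h
    have : cs = [] := List.eq_nil_of_length_eq_zero (Nat.le_zero.mp h)
    subst this; simp [PySem.Chars.replace.go]
  | succ n ih =>
    intro cs acc h
    cases cs with
    | nil => simp [PySem.Chars.replace.go]
    | cons c t =>
      simp only [PySem.Chars.replace.go]
      by_cases hc : c = ','
      · subst hc
        rw [if_pos (by simp [List.isPrefixOf])]
        simp only [List.length_cons] at h
        rw [ih _ _ (by simpa using h)]
        simp [pvF]
      · rw [if_neg (by simp [List.isPrefixOf, Ne.symm hc])]
        simp only [List.length_cons] at h
        rw [ih _ _ (by omega)]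
        simp [pvF, hc]

theorem pv_split_go (fuel : Nat) : ∀ (cs cur : List Char) (acc : List (List Char)), cs.length < fuel →
    PySem.Chars.splitOn.go [';'] fuel cs cur acc
      = acc.reverse ++ (pvSplit1 cs).modifyHead (cur.reverse ++ ·) := by
  induction fuel with
  | zero => intro cs cur acc h; omega
  | succ n ih =>
    intro cs cur acc h
    cases cs with
    | nil => simp [PySem.Chars.splitOn.go, pvSplit1]
    | cons c t =>
      simp only [PySem.Chars.splitOn.go]
      by_cases hc : c = ';'
      · subst hc
        rw [if_pos (by simp [List.isPrefixOf])]
        simp only [List.length_cons] at h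
        simp only [List.length_cons, List.length_nil, List.drop_succ_cons, List.drop_zero]
        rw [ih _ _ _ (by omega)]
        simp only [pvSplit1, List.reverse_cons, List.append_assoc]
        cases hs : pvSplit1 t with
        | nil => exact absurd hs (pvSplit1_ne_nil t)
        | cons p ps => simp
      · rw [if_neg (by simp [List.isPrefixOf, Ne.symm hc])]
        simp only [List.length_cons] at h
        rw [ih _ _ _ (by omega)]
        simp only [pvSplit1, if_neg hc]
        cases hs : pvSplit1 t with
        | nil => exact absurd hs (pvSplit1_ne_nil t)
        | cons p ps => simp

theorem pv_split1_map (cs : List Char) : pvSplit1 (cs.map pvF) = pvSplit2 cs := by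
  induction cs with
  | nil => simp [pvSplit1, pvSplit2]
  | cons c t ih =>
    simp only [List.map_cons, pvSplit1, pvSplit2]
    by_cases h : c = ',' ∨ c = ';'
    · rw [if_pos (by rcases h with h | h <;> simp [pvF, h]), if_pos h, ih]
    · rcases not_or.mp h with ⟨h1, h2⟩
      rw [if_neg (by simp [pvF, h1, h2]), if_neg h, ih]
      simp [pvF, h1]

theorem pv_ws_not_delim {c : Char} (h : PySem.Chars.isspace c = true) : ¬ (c = ',' ∨ c = ';') := by
  rintro (rfl | rfl) <;> simp_all [PySem.Chars.isspace]

theorem pv_split2_nodelim (cs : List Char) (h : ∀ c ∈ cs, ¬ (c = ',' ∨ c = ';')) :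
    pvSplit2 cs = [cs] := by
  induction cs with
  | nil => simp [pvSplit2]
  | cons c t ih =>
    simp only [pvSplit2, if_neg (h c (by simp))]
    rw [ih (fun x hx => h x (by simp [hx]))]
    simp

theorem pv_split2_nodelim_append (ws cs : List Char) (h : ∀ c ∈ ws, ¬ (c = ',' ∨ c = ';')) :
    pvSplit2 (ws ++ cs) = (pvSplit2 cs).modifyHead (ws ++ ·) := by
  induction ws with
  | nil =>
    simp only [List.nil_append]
    cases hs : pvSplit2 cs with
    | nil => exact absurd hs (pvSplit2_ne_nil cs)
    | cons p ps => simp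
  | cons w t ih =>
    simp only [List.cons_append, pvSplit2, if_neg (h w (by simp))]
    rw [ih (fun x hx => h x (by simp [hx]))]
    cases hs : pvSplit2 cs with
    | nil => exact absurd hs (pvSplit2_ne_nil cs)
    | cons p ps => simp

theorem pv_split2_append_ws (cs ws : List Char) (h : ∀ c ∈ ws, PySem.Chars.isspace c = true) :
    pvSplit2 (cs ++ ws) = pvAppLast ws (pvSplit2 cs) := by
  induction cs with
  | nil =>
    rw [List.nil_append, pv_split2_nodelim ws (fun c hc => pv_ws_not_delim (h c hc))]
    simp [pvSplit2, pvAppLast]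
  | cons c t ih =>
    simp only [List.cons_append, pvSplit2]
    by_cases hc : c = ',' ∨ c = ';'
    · rw [if_pos hc, if_pos hc, ih]
      cases hs : pvSplit2 t with
      | nil => exact absurd hs (pvSplit2_ne_nil t)
      | cons p ps => simp [pvAppLast]
    · rw [if_neg hc, if_neg hc, ih]
      cases hs : pvSplit2 t with
      | nil => exact absurd hs (pvSplit2_ne_nil t)
      | cons p ps =>
        cases ps with
        | nil => simp [pvAppLast]
        | cons q r => simp [pvAppLast]

theorem pv_dropWhile_all {α : Type} (pred : α → Bool) (a b : List α) (h : ∀ x ∈ a, pred x = true) :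
    List.dropWhile pred (a ++ b) = List.dropWhile pred b := by
  induction a with
  | nil => simp
  | cons x t ih => simp [h x (by simp), ih (fun y hy => h y (by simp [hy]))]

theorem pv_dropWhile_append_pos {α : Type} (pred : α → Bool) (a b : List α)
    (h : List.dropWhile pred a ≠ []) :
    List.dropWhile pred (a ++ b) = List.dropWhile pred a ++ b := by
  induction a with
  | nil => simp at h
  | cons x t ih =>
    by_cases hx : pred x = true
    · simp only [List.cons_append, List.dropWhile_cons, hx, if_true] at h ⊢
      exact ih h
    · simp [hx]

theorem pv_strip_ws_append (ws p : List Char) (h : ∀ c ∈ ws, PySem.Chars.isspace c = true) :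
    PySem.Chars.strip (ws ++ p) = PySem.Chars.strip p := by
  simp only [PySem.Chars.strip, PySem.Chars.lstrip, pv_dropWhile_all _ ws p h]

theorem pv_rstrip_append_ws (p ws : List Char) (h : ∀ c ∈ ws, PySem.Chars.isspace c = true) :
    PySem.Chars.rstrip (p ++ ws) = PySem.Chars.rstrip p := by
  simp only [PySem.Chars.rstrip, List.reverse_append]
  rw [pv_dropWhile_all _ ws.reverse p.reverse (by simpa using h)]

theorem pv_strip_append_ws (p ws : List Char) (h : ∀ c ∈ ws, PySem.Chars.isspace c = true) :
    PySem.Chars.strip (p ++ ws) = PySem.Chars.strip p := by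
  simp only [PySem.Chars.strip, PySem.Chars.lstrip]
  by_cases hp : List.dropWhile PySem.Chars.isspace p = []
  · have hps : ∀ x ∈ p, PySem.Chars.isspace x = true :=
      fun x hx => List.dropWhile_eq_nil_iff.mp hp x hx
    rw [pv_dropWhile_all _ p ws hps, hp, List.dropWhile_eq_nil_iff.mpr h]
  · rw [pv_dropWhile_append_pos _ p ws hp]
    exact pv_rstrip_append_ws _ ws h

theorem pv_T_modifyHead_ws (ws : List Char) (l : List (List Char))
    (h : ∀ c ∈ ws, PySem.Chars.isspace c = true) :
    pvT (l.modifyHead (ws ++ ·)) = pvT l := by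
  cases l with
  | nil => rfl
  | cons p ps => simp only [List.modifyHead_cons, pvT_cons, pv_strip_ws_append ws p h]

theorem pv_T_appLast_ws (ws : List Char) (l : List (List Char))
    (h : ∀ c ∈ ws, PySem.Chars.isspace c = true) :
    pvT (pvAppLast ws l) = pvT l := by
  induction l with
  | nil => rfl
  | cons p ps ih =>
    cases ps with
    | nil => simp only [pvAppLast, pvT_cons, pv_strip_append_ws p ws h]
    | cons q r =>
      simp only [pvAppLast] at ih ⊢
      rw [pvT_cons, ih, ← pvT_cons]

/-- stripping the whole string does not change the token list. -/
theorem pv_T_strip (cs : List Char) :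
    pvT (pvSplit2 (PySem.Chars.strip cs)) = pvT (pvSplit2 cs) := by
  have hws1 : ∀ c ∈ cs.takeWhile PySem.Chars.isspace, PySem.Chars.isspace c = true :=
    fun c hc => List.mem_takeWhile_imp hc
  have h1 : cs = cs.takeWhile PySem.Chars.isspace ++ PySem.Chars.lstrip cs :=
    (List.takeWhile_append_dropWhile).symm
  set m := PySem.Chars.lstrip cs with hm
  have hws2 : ∀ c ∈ (m.reverse.takeWhile PySem.Chars.isspace).reverse, PySem.Chars.isspace c = true :=
    fun c hc => List.mem_takeWhile_imp (List.mem_reverse.mp hc)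
  have h2 : m = PySem.Chars.strip cs ++ (m.reverse.takeWhile PySem.Chars.isspace).reverse := by
    have h := congrArg List.reverse
      (List.takeWhile_append_dropWhile (p := PySem.Chars.isspace) (l := m.reverse))
    simp only [List.reverse_append, List.reverse_reverse] at h
    have hstrip : PySem.Chars.strip cs = (List.dropWhile PySem.Chars.isspace m.reverse).reverse := by
      rw [PySem.Chars.strip, PySem.Chars.rstrip, ← hm]
    rw [hstrip]
    exact h.symm
  conv_rhs => rw [h1, pv_split2_nodelim_append _ _ (fun c hc => pv_ws_not_delim (hws1 c hc)),
    pv_T_modifyHead_ws _ _ hws1]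
  conv_rhs => rw [h2, pv_split2_append_ws _ _ hws2, pv_T_appLast_ws _ _ hws2]

/-- B's loop invariant. -/
theorem pv_B_inv (cs : List Char) : ∀ (res : List String) (buf : List Char),
    (∀ c ∈ buf, ¬ (c = ',' ∨ c = ';')) →
    pvFlush (cs.foldl pvStep (res, buf)) = res ++ pvT (pvSplit2 (buf ++ cs)) := by
  induction cs with
  | nil =>
    intro res buf hbuf
    simp only [List.foldl_nil, List.append_nil, pvFlush]
    rw [pv_split2_nodelim buf hbuf]
    by_cases h : PySem.Chars.strip buf = [] <;> simp [pvT, h]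
  | cons c t ih =>
    intro res buf hbuf
    simp only [List.foldl_cons]
    by_cases hc : c = ',' ∨ c = ';'
    · rw [show pvStep (res, buf) c
          = (if PySem.Chars.strip buf ≠ [] then res ++ [String.ofList (PySem.Chars.strip buf)] else res, []) from by
        simp only [pvStep]; rw [if_pos (by rcases hc with rfl | rfl <;> simp)]]
      rw [ih _ [] (by simp)]
      have hsplit : pvSplit2 (buf ++ c :: t) = buf :: pvSplit2 t := by
        rw [pv_split2_nodelim_append buf _ hbuf]
        simp only [pvSplit2, if_pos hc, List.modifyHead_cons, List.append_nil]
      rw [hsplit, pvT_cons]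
      by_cases h : PySem.Chars.strip buf = [] <;> simp [h]
    · rcases not_or.mp hc with ⟨h1, h2⟩
      rw [show pvStep (res, buf) c = (res, buf ++ [c]) from by
        simp only [pvStep]; rw [if_neg (by simp [h1, h2])]]
      rw [ih res (buf ++ [c]) (by
        intro x hx
        rcases List.mem_append.mp hx with hx | hx
        · exact hbuf x hx
        · simp at hx; subst hx; exact hc)]
      simp

theorem pv_alt_eq (v : String) : parse_path_list_alt (some v) = pvT (pvSplit2 v.toList) := by
  have h0 : parse_path_list_alt (some v) = pvFlush (v.toList.foldl pvStep ([], [])) := rfl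
  rw [h0, pv_B_inv v.toList [] [] (by simp)]
  rfl

theorem pv_A_tokens (raw : List Char) :
    (((PySem.Chars.splitOn (PySem.Chars.replace raw [','] [';']) [';']).map PySem.Chars.strip).filter
      (fun p => p ≠ [])).map String.ofList = pvT (pvSplit2 raw) := by
  have hrep : PySem.Chars.replace raw [','] [';'] = raw.map pvF := by
    rw [PySem.Chars.replace]
    rw [if_neg (by simp)]
    simpa using pv_rep_go raw.length raw [] (le_refl _)
  have hsplit : PySem.Chars.splitOn (raw.map pvF) [';'] = pvSplit2 raw := by
    rw [PySem.Chars.splitOn, pv_split_go _ _ _ _ (by omega)]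
    simp only [List.reverse_nil, List.nil_append]
    rw [← pv_split1_map]
    cases hs : pvSplit1 (raw.map pvF) with
    | nil => exact absurd hs (pvSplit1_ne_nil _)
    | cons p ps => simp
  rw [hrep, hsplit]
  rfl

-- ===== VERDICT (by name: the statement is the Claim_ definition above) =====
theorem parse_path_list_spec : Claim_equal_parse_path_list := by
  intro value _
  unfold Spec_parse_path_list
  cases value with
  | none => rfl
  | some v =>
    rw [pv_alt_eq]
    by_cases hv : v = ""
    · subst hv
      simp [parse_path_list, pvT, pvSplit2, PySem.Chars.strip, PySem.Chars.lstrip, PySem.Chars.rstrip]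
    · simp only [parse_path_list, if_neg hv]
      have htl : (PySem.Str.strip v).toList = PySem.Chars.strip v.toList := by
        simp [PySem.Str.strip]
      by_cases hraw : PySem.Str.strip v = ""
      · rw [if_pos hraw]
        have : PySem.Chars.strip v.toList = [] := by
          rw [← htl, hraw]; rfl
        rw [← pv_T_strip, this]
        simp [pvT, pvSplit2, PySem.Chars.strip, PySem.Chars.lstrip, PySem.Chars.rstrip]
      · rw [if_neg hraw]
        have hr : (PySem.Str.replace (PySem.Str.strip v) "," ";").toList
            = PySem.Chars.replace (PySem.Chars.strip v.toList) [','] [';'] := by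
          simp [PySem.Str.replace, htl]
        rw [hr, pv_A_tokens, pv_T_strip]
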